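-- pv_equiv track=rewrite | github.com/zic63/my_test_repo | larry_game.py | introduce_stooges
-- ===== SOURCE A (Python) =====
-- def num_converter(num):
--     dict = {
--             1: "one",
--             2: "two",
--             3: "three",
--             4: "four",
--             5: "five",
--             6: "six",
--             7: "seven",
--             8: "eight",
--             9: "nine",
--             10: "ten",
--             11: "eleven",
--             12: "twelve",
--             13: "thirteen",
--             14: "fourteen",
--             15: "fifteen",
--             16: "sixteen",
--             17: "seventeen",
--             18: "eighteen",
--             19: "nineteen",
--             20: "twenty"
--         }
--     return dict[num]
--
-- def introduce_stooges(names):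
--     message_2 = ''
--     message_1 = f'{num_converter(len(names))[0].upper() + num_converter(len(names))[1:].lower()} balbeses: '
--     x = 1
--     for name in names:
--         message_2 += f'{x}: {name}'
--         if x < len(names) - 1:
--             message_2 += ', '
--         elif x < len(names):
--             message_2 += ' and '
--         x += 1
--
--     return message_1, message_2
-- ===== SOURCE B (Python) =====
-- NUM_WORDS_CAP = (
--     "One", "Two", "Three", "Four", "Five", "Six", "Seven", "Eight", "Nine",
--     "Ten", "Eleven", "Twelve", "Thirteen", "Fourteen", "Fifteen", "Sixteen",
--     "Seventeen", "Eighteen", "Nineteen", "Twenty"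
-- )
--
--
-- def _fmt(i, names):
--     if not names:
--         return ''
--     head = f'{i}: {names[0]}'
--     rest = names[1:]
--     if not rest:
--         return head
--     sep = ' and ' if len(rest) == 1 else ', '
--     return head + sep + _fmt(i + 1, rest)
--
--
-- def introduce_stooges(names):
--     message_1 = NUM_WORDS_CAP[len(names) - 1] + ' balbeses: '
--     return message_1, _fmt(1, names)
-- ===== Notes on version B (the rewrite author's own statement) =====
-- stated objective: alternative
-- what changed: A capitalizes a number word fetched from a dict and builds message_2 with an index-accumulator loop choosing the separator per iteration; B reads the capitalized word from a precomputed tuple and builds message_2 by structural recursion on the list, choosing the separator from the length of the remaining tail.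
import Mathlib
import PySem

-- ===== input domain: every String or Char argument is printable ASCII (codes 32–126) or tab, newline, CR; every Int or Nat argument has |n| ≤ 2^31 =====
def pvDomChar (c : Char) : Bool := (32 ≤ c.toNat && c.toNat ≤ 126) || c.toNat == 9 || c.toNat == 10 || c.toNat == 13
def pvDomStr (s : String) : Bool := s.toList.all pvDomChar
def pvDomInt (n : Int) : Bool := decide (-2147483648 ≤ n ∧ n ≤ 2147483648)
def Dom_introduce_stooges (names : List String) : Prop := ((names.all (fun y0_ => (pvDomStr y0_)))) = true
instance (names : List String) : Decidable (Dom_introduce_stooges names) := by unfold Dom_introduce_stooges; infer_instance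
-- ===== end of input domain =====

-- B replaces A's dict-fetch-then-capitalize and per-iteration separator loop by a precomputed capitalized word table and structural recursion with a tail-length separator choice (alternative decomposition; same cost).


-- ===== PORT A =====
-- dict literal + dict[num] (KeyError → none)
def num_converter (num : Int) : Option (List Char) :=
  (PySem.Dict.ofList [((1:Int), "one".toList), (2, "two".toList), (3, "three".toList),
    (4, "four".toList), (5, "five".toList), (6, "six".toList), (7, "seven".toList),
    (8, "eight".toList), (9, "nine".toList), (10, "ten".toList), (11, "eleven".toList),
    (12, "twelve".toList), (13, "thirteen".toList), (14, "fourteen".toList),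
    (15, "fifteen".toList), (16, "sixteen".toList), (17, "seventeen".toList),
    (18, "eighteen".toList), (19, "nineteen".toList), (20, "twenty".toList)]).get? num

def introduce_stooges (names : List String) : String × String :=
  let n : Int := (names.length : Int)
  -- f'{num_converter(len(names))[0].upper() + num_converter(len(names))[1:].lower()} balbeses: '
  -- (the .getD [] default is never reached inside Pre_)
  let w := (num_converter n).getD []
  let message_1 :=
    (match PySem.List.pyGet? w 0 with
      | some c => [PySem.Chars.upperChar c]
      | none => []) ++ PySem.Chars.lower (PySem.List.slice w (some 1) none) ++ " balbeses: ".toList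
  let r := names.foldl (fun (st : List Char × Int) name =>
      let m := st.1 ++ PySem.Int.toChars st.2 ++ ": ".toList ++ name.toList
      let m := if st.2 < n - 1 then m ++ ", ".toList
               else if st.2 < n then m ++ " and ".toList else m
      (m, st.2 + 1)) (([] : List Char), (1 : Int))
  (String.ofList message_1, String.ofList r.1)

-- ===== PORT B =====
-- NUM_WORDS_CAP tuple (indexed by len(names) - 1)
def num_words_cap : List (List Char) :=
  ["One".toList, "Two".toList, "Three".toList, "Four".toList, "Five".toList,
   "Six".toList, "Seven".toList, "Eight".toList, "Nine".toList, "Ten".toList,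
   "Eleven".toList, "Twelve".toList, "Thirteen".toList, "Fourteen".toList,
   "Fifteen".toList, "Sixteen".toList, "Seventeen".toList, "Eighteen".toList,
   "Nineteen".toList, "Twenty".toList]

-- _fmt(i, names): structural recursion, separator chosen by the length of the tail
-- (python's 'if not rest: return head' is the [name] pattern)
def fmt_stooges : Int → List String → List Char
  | _, [] => []
  | i, [name] => PySem.Int.toChars i ++ ": ".toList ++ name.toList
  | i, name :: rest =>
      (PySem.Int.toChars i ++ ": ".toList ++ name.toList)
        ++ (if rest.length == 1 then " and ".toList else ", ".toList)
        ++ fmt_stooges (i + 1) rest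

def introduce_stooges_alt (names : List String) : String × String :=
  let message_1 := ((PySem.List.pyGet? num_words_cap ((names.length : Int) - 1)).getD [])
                   ++ " balbeses: ".toList
  (String.ofList message_1, String.ofList (fmt_stooges 1 names))

-- ===== PRECONDITION & SPEC =====
-- A raises KeyError in num_converter when len(names) is 0 or above 20; Pre_ excludes exactly those inputs.
def Pre_introduce_stooges (names : List String) : Prop := 1 ≤ names.length ∧ names.length ≤ 20
instance (names : List String) : Decidable (Pre_introduce_stooges names) := by
  unfold Pre_introduce_stooges; infer_instance
def pvWitness_introduce_stooges : List String := ["Moe", "Larry", "Curly"]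
def Spec_introduce_stooges (names : List String) (out : String × String) : Prop := out = introduce_stooges_alt names
instance (names : List String) (out : String × String) : Decidable (Spec_introduce_stooges names out) := by unfold Spec_introduce_stooges; infer_instance

-- ===== CLAIM =====
def Claim_equal_introduce_stooges : Prop := ∀ (names : List String), Dom_introduce_stooges names → Pre_introduce_stooges names → Spec_introduce_stooges names (introduce_stooges names)

-- ===== LEMMAS AND PROOFS =====

-- closed recursive form of A's loop output, starting at index x
def restA (n : Int) : Int → List String → List Char
  | _, [] => []
  | x, name :: t =>
      ((PySem.Int.toChars x ++ ": ".toList ++ name.toList)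
        ++ (if x < n - 1 then ", ".toList
            else if x < n then " and ".toList else [])) ++ restA n (x + 1) t

theorem foldA_eq (n : Int) (l : List String) : ∀ (msg : List Char) (x : Int),
    List.foldl (fun (st : List Char × Int) name =>
      let m := st.1 ++ PySem.Int.toChars st.2 ++ ": ".toList ++ name.toList
      let m := if st.2 < n - 1 then m ++ ", ".toList
               else if st.2 < n then m ++ " and ".toList else m
      (m, st.2 + 1)) (msg, x) l = (msg ++ restA n x l, x + l.length) := by
  induction l with
  | nil => intro msg x; simp [restA]
  | cons a t ih =>
      intro msg x
      simp only [List.foldl_cons, ih, restA, Prod.mk.injEq]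
      refine ⟨?_, by simp; omega⟩
      split_ifs <;> simp

theorem restA_eq_fmt (l : List String) : ∀ (x n : Int), x + l.length = n + 1 →
    restA n x l = fmt_stooges x l := by
  induction l with
  | nil => intro x n _; rfl
  | cons a t ih =>
      intro x n hx
      match t with
      | [] =>
          have h1 : ¬ x < n - 1 := by simp at hx; omega
          have h2 : ¬ x < n := by simp at hx; omega
          simp [restA, fmt_stooges, h1, h2]
      | [b] =>
          have h1 : ¬ x < n - 1 := by simp at hx; omega
          have h2 : x < n := by simp at hx; omega
          have h3 : ¬ x + 1 < n - 1 := by simp at hx; omega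
          have h4 : ¬ x + 1 < n := by simp at hx; omega
          simp [restA, fmt_stooges, h1, h2, h3, h4]
      | b :: c :: t' =>
          have h1 : x < n - 1 := by simp at hx; omega
          have hlen : ¬ (((b :: c :: t').length == 1) = true) := by simp
          have ihr := ih (x + 1) n (by simp at hx ⊢; omega)
          rw [restA, fmt_stooges, if_pos h1, if_neg hlen, ihr]
          simp

theorem msg1_eq (n : Nat) (h1 : 1 ≤ n) (h2 : n ≤ 20) :
    (match PySem.List.pyGet? ((num_converter (n : Int)).getD []) 0 with
      | some c => [PySem.Chars.upperChar c]
      | none => ([] : List Char))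
      ++ PySem.Chars.lower (PySem.List.slice ((num_converter (n : Int)).getD []) (some 1) none)
    = (PySem.List.pyGet? num_words_cap ((n : Int) - 1)).getD [] := by
  interval_cases n <;> decide

-- ===== VERDICT =====
theorem introduce_stooges_spec : Claim_equal_introduce_stooges := by
  intro names _ hpre
  obtain ⟨h1, h2⟩ := hpre
  unfold Spec_introduce_stooges introduce_stooges introduce_stooges_alt
  simp only [foldA_eq, List.nil_append]
  refine Prod.ext ?_ ?_
  · show String.ofList _ = String.ofList _
    rw [msg1_eq names.length h1 h2]
  · show String.ofList _ = String.ofList _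
    rw [restA_eq_fmt names 1 (names.length : Int) (by omega)]
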